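-- pv_equiv track=rewrite | github.com/Vaibhav-crux/ai_dast_security_tool | modules/zap_cve_enricher.py | extract_cves_from_zap
-- ===== SOURCE A (Python) =====
-- from typing import List, Dict, Any
--
-- def extract_cves_from_zap(alerts: List[Dict[str, Any]]) -> List[str]:
--     """Extract CVE IDs from ZAP alerts."""
--     cves = set()
--     for alert in alerts:
--         # Check references for CVE IDs
--         refs = alert.get("reference", "")
--         if "CVE-" in refs:
--             for part in refs.split():
--                 if part.startswith("CVE-"):
--                     cves.add(part.strip(",.;:))]"))
--         # Check evidence for CVE IDs
--         evidence = alert.get("evidence", "")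
--         if "CVE-" in evidence:
--             for part in evidence.split():
--                 if part.startswith("CVE-"):
--                     cves.add(part.strip(",.;:))]"))
--     return list(cves)
-- ===== SOURCE B (Python) =====
-- import re
--
-- _CVE_RE = re.compile(r'(?<!\S)CVE-\S*')
--
-- def extract_cves_from_zap(alerts):
--     """Extract CVE IDs from ZAP alerts."""
--     cves = set()
--     for alert in alerts:
--         for field in ("reference", "evidence"):
--             for m in _CVE_RE.findall(alert.get(field, "")):
--                 cves.add(m.rstrip(",.;:)]"))
--     return list(cves)
-- ===== Notes on version B (the rewrite author's own statement) =====
-- stated objective: idiomatic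
-- what changed: Replaces A's per-field 'CVE-' substring pre-check plus whitespace split, startswith filter and strip with a single compiled boundary-anchored regex scan (re.findall(r'(?<!\S)CVE-\S*')) followed by an rstrip of trailing punctuation.
import Mathlib
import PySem

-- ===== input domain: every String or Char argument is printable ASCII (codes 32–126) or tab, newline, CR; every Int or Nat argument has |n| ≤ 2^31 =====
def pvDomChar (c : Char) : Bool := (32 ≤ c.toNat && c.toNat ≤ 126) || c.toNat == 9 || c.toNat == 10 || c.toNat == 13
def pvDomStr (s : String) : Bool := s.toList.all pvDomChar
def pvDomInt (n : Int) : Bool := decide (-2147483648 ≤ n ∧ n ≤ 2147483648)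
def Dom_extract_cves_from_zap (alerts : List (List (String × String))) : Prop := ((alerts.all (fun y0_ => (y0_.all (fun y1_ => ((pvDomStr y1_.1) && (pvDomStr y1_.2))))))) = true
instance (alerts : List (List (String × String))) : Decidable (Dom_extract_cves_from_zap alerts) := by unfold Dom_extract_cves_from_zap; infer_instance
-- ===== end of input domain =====

-- B replaces A's per-field "CVE-" substring pre-check + whitespace split + startswith filter + strip
-- by a single boundary-anchored regex scan (re.findall(r'(?<!\S)CVE-\S*')) with an rstrip of trailing
-- punctuation (objective: idiomatic). Both Pythons return list(set(...)); the ports return the set in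
-- first-insertion order (Python's hash iteration order is not modelled), so equality is as sets.

-- ===== PORT A =====
def extract_cves_from_zap (alerts : List (List (String × String))) : List String :=
  alerts.foldl
    (fun (cves : PySem.Set String) alert =>
      let refs := (PySem.Dict.mk alert).getD "reference" ""
      let cves :=
        if PySem.Str.isIn "CVE-" refs then
          (PySem.Str.split₀ refs).foldl
            (fun cves part =>
              if PySem.Str.startswith part "CVE-" then
                PySem.Set.add cves (PySem.Str.stripChars part ",.;:))]")
              else cves)
            cves
        else cves
      let evidence := (PySem.Dict.mk alert).getD "evidence" ""
      if PySem.Str.isIn "CVE-" evidence then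
        (PySem.Str.split₀ evidence).foldl
          (fun cves part =>
            if PySem.Str.startswith part "CVE-" then
              PySem.Set.add cves (PySem.Str.stripChars part ",.;:))]")
            else cves)
          cves
      else cves)
    PySem.Set.empty

-- ===== PORT B =====
-- Hand port of re.findall(r'(?<!\S)CVE-\S*', s) (PySem has no regex): one left-to-right scan;
-- `bound` is the lookbehind (?<!\S) at the current position. Exact: resuming right after a match
-- equals continuing the scan with bound = false, because inside a matched token every position
-- has a non-space predecessor, so the lookbehind blocks any in-token match.
def pvCveScan : List Char → Bool → List (List Char)
  | [], _ => []
  | c :: rest, bound =>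
    if bound && PySem.Chars.startswith (c :: rest) ['C', 'V', 'E', '-'] then
      (c :: rest.takeWhile (fun ch => !PySem.Chars.isspace ch)) :: pvCveScan rest (PySem.Chars.isspace c)
    else pvCveScan rest (PySem.Chars.isspace c)

-- m.rstrip(',.;:)]')
def pvRstrip (m : List Char) : List Char :=
  (m.reverse.dropWhile (fun ch => (",.;:)]".toList).contains ch)).reverse

def extract_cves_from_zap_alt (alerts : List (List (String × String))) : List String :=
  alerts.foldl
    (fun (cves : PySem.Set String) alert =>
      [(PySem.Dict.mk alert).getD "reference" "", (PySem.Dict.mk alert).getD "evidence" ""].foldl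
        (fun cves s =>
          (pvCveScan s.toList true).foldl
            (fun cves m => PySem.Set.add cves (String.ofList (pvRstrip m)))
            cves)
        cves)
    PySem.Set.empty

-- ===== PRECONDITION & SPEC =====
def Spec_extract_cves_from_zap (alerts : List (List (String × String))) (out : List String) : Prop := out = extract_cves_from_zap_alt alerts
instance (alerts : List (List (String × String))) (out : List String) : Decidable (Spec_extract_cves_from_zap alerts out) := by unfold Spec_extract_cves_from_zap; infer_instance

-- ===== CLAIM (what is proved, stated in full; the proofs are below) =====
def Claim_equal_extract_cves_from_zap : Prop := ∀ (alerts : List (List (String × String))), Dom_extract_cves_from_zap alerts → Spec_extract_cves_from_zap alerts (extract_cves_from_zap alerts)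

-- ===== LEMMAS AND PROOFS =====

-- Python str.split(): the maximal non-whitespace runs, recursively.
def pvTokens : List Char → List (List Char)
  | [] => []
  | c :: rest =>
    if PySem.Chars.isspace c then pvTokens rest
    else (c :: rest.takeWhile (fun ch => !PySem.Chars.isspace ch)) :: pvTokens (rest.dropWhile (fun ch => !PySem.Chars.isspace ch))
termination_by s => s.length
decreasing_by
  · simp
  · have := List.length_dropWhile_le (fun ch => !PySem.Chars.isspace ch) rest
    simp; omega

lemma pvGo_spec (s cur : List Char) (accl : List (List Char)) :
    PySem.Chars.split₀.go s cur accl =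
      accl.reverse ++
        (if cur.isEmpty then pvTokens s
         else (cur.reverse ++ s.takeWhile (fun ch => !PySem.Chars.isspace ch)) ::
                pvTokens (s.dropWhile (fun ch => !PySem.Chars.isspace ch))) := by
  induction s generalizing cur accl with
  | nil =>
    rw [PySem.Chars.split₀.go]
    cases cur <;> simp [pvTokens]
  | cons c rest ih =>
    rw [PySem.Chars.split₀.go]
    by_cases hsp : PySem.Chars.isspace c = true
    · cases cur with
      | nil => simp [hsp, ih, pvTokens]
      | cons d ds => simp [hsp, ih, pvTokens]
    · cases cur with
      | nil => simp [hsp, ih, pvTokens]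
      | cons d ds => simp [hsp, ih]

lemma pvSplit_eq_tokens (s : List Char) : PySem.Chars.split₀ s = pvTokens s := by
  unfold PySem.Chars.split₀
  rw [pvGo_spec]
  rfl

-- a whitespace character cannot open a "CVE-" match
lemma pvNotC {r : List Char} (c : Char) (hsp : PySem.Chars.isspace c = true) :
    PySem.Chars.startswith (c :: r) ['C','V','E','-'] = false := by
  cases hc : PySem.Chars.startswith (c :: r) ['C','V','E','-'] with
  | false => rfl
  | true =>
    rw [PySem.Chars.startswith_iff] at hc
    rcases hc with ⟨t, ht⟩
    simp at ht
    obtain ⟨hC, -⟩ := ht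
    rw [← hC] at hsp
    exact absurd hsp (by decide)

-- with the lookbehind blocked, the scan skips the current non-space run
lemma pvScan_false (s : List Char) :
    pvCveScan s false = pvCveScan (s.dropWhile (fun ch => !PySem.Chars.isspace ch)) true := by
  induction s with
  | nil => rfl
  | cons c rest ih =>
    by_cases hsp : PySem.Chars.isspace c = true
    · rw [List.dropWhile_cons]
      simp only [hsp]
      rw [pvCveScan.eq_def, pvCveScan.eq_def]
      simp [pvNotC c hsp, hsp]
    · rw [List.dropWhile_cons]
      simp only [Bool.not_eq_true] at hsp
      simp only [hsp]
      rw [pvCveScan.eq_def]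
      simp [hsp, ih]

lemma pvPrefix_takeWhile {p s : List Char} {pr : Char → Bool} (h : p <+: s)
    (hall : ∀ a ∈ p, pr a = true) : p <+: s.takeWhile pr := by
  obtain ⟨t, rfl⟩ := h
  rw [List.takeWhile_append, if_pos (by rw [List.takeWhile_eq_self_iff.2 hall])]
  exact ⟨List.takeWhile pr t, rfl⟩

-- a token starts with "CVE-" iff the string does at the token's start
lemma pvPred_token {c : Char} {rest : List Char} (hsp : PySem.Chars.isspace c = false) :
    PySem.Chars.startswith (c :: rest.takeWhile (fun ch => !PySem.Chars.isspace ch)) ['C','V','E','-']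
      = PySem.Chars.startswith (c :: rest) ['C','V','E','-'] := by
  have htok : c :: rest.takeWhile (fun ch => !PySem.Chars.isspace ch)
      = (c :: rest).takeWhile (fun ch => !PySem.Chars.isspace ch) := by
    simp [hsp]
  cases hm : PySem.Chars.startswith (c :: rest) ['C','V','E','-'] with
  | true =>
    rw [PySem.Chars.startswith_iff]
    rw [htok]
    rw [PySem.Chars.startswith_iff] at hm
    exact pvPrefix_takeWhile hm (by intro a ha; fin_cases ha <;> rfl)
  | false =>
    cases ht : PySem.Chars.startswith (c :: rest.takeWhile (fun ch => !PySem.Chars.isspace ch)) ['C','V','E','-'] with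
    | false => rfl
    | true =>
      exfalso
      have h1 := (PySem.Chars.startswith_iff _ _).1 ht
      have h2 : ['C','V','E','-'] <+: (c :: rest) := h1.trans (htok ▸ List.takeWhile_prefix _)
      rw [← PySem.Chars.startswith_iff] at h2
      simp [hm] at h2

-- the scan produces exactly the whitespace-split tokens that start with "CVE-"
lemma pvScan_eq_filter_aux : ∀ (n : Nat) (s : List Char), s.length ≤ n →
    pvCveScan s true =
      (pvTokens s).filter (fun t => PySem.Chars.startswith t ['C', 'V', 'E', '-']) := by
  intro n
  induction n with
  | zero => intro s h; cases s with
    | nil => rw [pvCveScan.eq_def, pvTokens.eq_def]; rfl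
    | cons c r => simp at h
  | succ n ih =>
    intro s h
    cases s with
    | nil => rw [pvCveScan.eq_def, pvTokens.eq_def]; rfl
    | cons c rest =>
      simp only [List.length_cons, Nat.succ_le_succ_iff] at h
      by_cases hsp : PySem.Chars.isspace c = true
      · rw [pvCveScan.eq_def, pvTokens.eq_def]
        simp [pvNotC c hsp, hsp]
        exact ih rest h
      · simp only [Bool.not_eq_true] at hsp
        have hdrop : (List.dropWhile (fun ch => !PySem.Chars.isspace ch) rest).length ≤ n :=
          le_trans (List.length_dropWhile_le _ _) h
        have hcont : pvCveScan rest false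
            = (pvTokens (rest.dropWhile (fun ch => !PySem.Chars.isspace ch))).filter
                (fun t => PySem.Chars.startswith t ['C', 'V', 'E', '-']) := by
          rw [pvScan_false]
          exact ih _ hdrop
        by_cases hm : PySem.Chars.startswith (c :: rest) ['C','V','E','-'] = true
        · rw [pvCveScan.eq_def, pvTokens.eq_def]
          simp only [hsp, hm, Bool.and_true, if_pos, Bool.false_eq_true, if_false]
          rw [List.filter_cons, if_pos (by rw [pvPred_token hsp]; exact hm)]
          rw [hcont]
        · simp only [Bool.not_eq_true] at hm
          rw [pvCveScan.eq_def, pvTokens.eq_def]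
          simp only [hsp, hm, Bool.and_false, Bool.false_eq_true, if_false]
          rw [List.filter_cons, if_neg (by rw [pvPred_token hsp, hm]; simp)]
          rw [hcont]

-- no "CVE-" substring, no match (A's `if "CVE-" in s` pre-check is redundant for B)
lemma pvScan_nil (s : List Char) (b : Bool) (h : ¬ (['C', 'V', 'E', '-'] <:+: s)) :
    pvCveScan s b = [] := by
  induction s generalizing b with
  | nil => rfl
  | cons c rest ih =>
    rw [pvCveScan.eq_def]
    have hm : PySem.Chars.startswith (c :: rest) ['C','V','E','-'] = false := by
      cases hm : PySem.Chars.startswith (c :: rest) ['C','V','E','-'] with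
      | false => rfl
      | true =>
        rw [PySem.Chars.startswith_iff] at hm
        exact absurd hm.isInfix h
    simp only [hm, Bool.and_false, Bool.false_eq_true, if_false]
    exact ih _ (fun hr => h (List.infix_cons hr))

-- on a token starting with 'C', strip(",.;:))]") = rstrip(",.;:)]")
lemma pvStrip_eq_rstrip (t : List Char) (h : PySem.Chars.startswith t ['C', 'V', 'E', '-'] = true) :
    PySem.Chars.stripChars t (",.;:))]".toList) = pvRstrip t := by
  obtain ⟨u, rfl⟩ := PySem.Chars.startswith_iff _ _ |>.1 h
  have hset : (fun c => (",.;:))]".toList).contains c) = (fun ch => (",.;:)]".toList).contains ch) := by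
    funext c
    show (['\u002C','.',';',':',')',')',']'].contains c) = (['\u002C','.',';',':',')',']'].contains c)
    simp [List.contains_eq_mem]
  unfold PySem.Chars.stripChars pvRstrip
  rw [hset]
  congr 1

lemma pvFoldl_filter {α β : Type} (l : List α) (q : α → Bool) (g : β → α → β) (init : β) :
    l.foldl (fun cv p => if q p then g cv p else cv) init = (l.filter q).foldl g init := by
  induction l generalizing init with
  | nil => rfl
  | cons x xs ih =>
    by_cases h : q x = true <;> simp [List.foldl, List.filter, h, ih]

-- the per-string block of A equals the per-string block of B
lemma pvBlock_eq (cves : PySem.Set String) (s : String) :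
    (if PySem.Str.isIn "CVE-" s then
        (PySem.Str.split₀ s).foldl
          (fun cves part =>
            if PySem.Str.startswith part "CVE-" then
              PySem.Set.add cves (PySem.Str.stripChars part ",.;:))]")
            else cves)
          cves
      else cves)
    = (pvCveScan s.toList true).foldl
        (fun cves m => PySem.Set.add cves (String.ofList (pvRstrip m))) cves := by
  have hcve : ("CVE-".toList) = ['C','V','E','-'] := by decide
  by_cases hin : PySem.Str.isIn "CVE-" s = true
  · rw [if_pos hin]
    unfold PySem.Str.split₀
    rw [List.foldl_map, pvSplit_eq_tokens, pvScan_eq_filter_aux s.toList.length s.toList le_rfl,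
        ← pvFoldl_filter]
    congr 1
    funext cv t
    by_cases hp : PySem.Chars.startswith t ['C','V','E','-'] = true
    · rw [if_pos hp]
      have hsw : PySem.Str.startswith (String.ofList t) "CVE-" = true := by
        rw [PySem.Str.startswith_eq, String.toList_ofList, hcve]; exact hp
      rw [if_pos hsw]
      congr 1
      unfold PySem.Str.stripChars
      rw [String.toList_ofList]
      show String.ofList (PySem.Chars.stripChars t (",.;:))]".toList)) = String.ofList (pvRstrip t)
      rw [pvStrip_eq_rstrip t hp]
    · simp only [Bool.not_eq_true] at hp
      rw [if_neg (by simp [hp]), if_neg (by simp [hp])]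
  · simp only [Bool.not_eq_true] at hin
    have hin' : PySem.Chars.isIn ['C','V','E','-'] s.toList = false := by
      simpa using hin
    rw [if_neg (by simp [hin'])]
    rw [pvScan_nil s.toList true ((PySem.Chars.isIn_eq_false_iff _ _).1 hin')]
    rfl

-- ===== VERDICT (by name: the statement is the Claim_ definition above) =====
theorem extract_cves_from_zap_spec : Claim_equal_extract_cves_from_zap := by
  intro alerts _
  unfold Spec_extract_cves_from_zap extract_cves_from_zap extract_cves_from_zap_alt
  congr 1
  funext cves alert
  simp only [List.foldl]
  rw [← pvBlock_eq, ← pvBlock_eq]
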